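-- pv_equiv track=rewrite | github.com/jz-lu/mirrorcodes | helix.py | _column_permutations_by_size
-- ===== SOURCE A (Python) =====
-- import itertools as it
--
-- def _column_permutations_by_size(group):
--     """
--     Build all column permutations that permute only among equal-size cyclic factors.
--     This models all isomorphisms that arise from reordering isomorphic factors.
--     """
--     # collect indices per modulus
--     by_size = {}
--     for idx, m in enumerate(group):
--         by_size.setdefault(int(m), []).append(idx)
--     # list of permutations per block
--     per_block = [list(it.permutations(block)) for block in by_size.values()]
--     # product to yield a full-column permutation each time
--     for choice in it.product(*per_block):
--         # start with identity mapping
--         perm = list(range(len(group)))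
--         for block_perm in choice:
--             # block_perm is a permutation tuple of original indices belonging to one block
--             # place them into the same positions they originally occupied, reordered
--             for new_pos, old_idx in zip(sorted(block_perm), block_perm):
--                 perm[new_pos] = old_idx
--         yield tuple(perm)
-- ===== SOURCE B (Python) =====
-- import itertools as it
--
-- def _column_permutations_by_size(group):
--     """
--     Build all column permutations that permute only among equal-size cyclic factors,
--     by recursing block-by-block over the list of position blocks instead of
--     materializing per-block permutation lists and driving them with it.product.
--     """
--     blocks = {}
--     for idx, m in enumerate(group):
--         blocks.setdefault(int(m), []).append(idx)
--     block_list = list(blocks.values())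
--
--     def helper(b, perm):
--         if b == len(block_list):
--             yield tuple(perm)
--             return
--         positions = block_list[b]
--         for p in it.permutations(positions):
--             for pos, new_idx in zip(positions, p):
--                 perm[pos] = new_idx
--             yield from helper(b + 1, perm)
--
--     yield from helper(0, list(range(len(group))))
-- ===== Notes on version B (the rewrite author's own statement) =====
-- stated objective: alternative
-- what changed: B replaces A's materialized per-block permutation lists driven by itertools.product with a recursive generator over the position blocks that assigns each block's permuted indices into a shared partial permutation and recurses to the next block, yielding copies at the leaves.
import Mathlib
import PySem

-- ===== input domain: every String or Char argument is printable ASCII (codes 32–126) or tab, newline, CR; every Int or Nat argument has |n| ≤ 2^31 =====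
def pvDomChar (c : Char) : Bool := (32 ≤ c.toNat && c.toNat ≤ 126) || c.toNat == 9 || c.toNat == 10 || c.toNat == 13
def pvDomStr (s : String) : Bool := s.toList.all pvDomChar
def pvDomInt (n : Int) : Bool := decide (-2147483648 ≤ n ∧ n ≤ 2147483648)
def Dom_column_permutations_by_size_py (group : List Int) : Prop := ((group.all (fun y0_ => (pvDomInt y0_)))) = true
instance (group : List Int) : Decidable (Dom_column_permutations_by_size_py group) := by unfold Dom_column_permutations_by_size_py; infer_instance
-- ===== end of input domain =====

-- B recurses block-by-block over the position blocks instead of materializing the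
-- per-block permutation lists and driving them with itertools.product (objective:
-- alternative decomposition, same output in the same order; A's generator is
-- compared through list(...)).

-- itertools.permutations xs: pick each index left to right, recurse on the rest
-- (exactly Python's emission order); fuel = length of the list.
def pyPermAux : Nat → List Int → List (List Int)
  | 0, _ => [[]]
  | n + 1, xs =>
    (List.range xs.length).flatMap
      (fun i => (pyPermAux n (xs.eraseIdx i)).map (fun r => xs.getD i 0 :: r))

def pyPermutations (xs : List Int) : List (List Int) := pyPermAux xs.length xs

-- ===== PORT A =====
-- itertools.product(*per_block): leftmost factor varies slowest
def pyProduct : List (List (List Int)) → List (List (List Int))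
  | [] => [[]]
  | b :: bs => b.flatMap (fun x => (pyProduct bs).map (fun rest => x :: rest))

-- by_size.setdefault(int(m), []).append(idx)  ==  modify m [] (· ++ [idx])
def column_permutations_by_size_py (group : List Int) : List (List Int) :=
  let by_size := (PySem.List.enumerate group 0).foldl
      (fun d p => d.modify p.2 [] (· ++ [p.1])) PySem.Dict.empty
  let per_block := by_size.values.map pyPermutations
  (pyProduct per_block).map (fun choice =>
    choice.foldl
      (fun perm bp =>
        ((PySem.List.sorted bp (fun x => x) false).zip bp).foldl
          (fun pr q => PySem.List.pySetD pr q.1 q.2) perm)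
      (PySem.List.pyRange 0 (group.length : Int) 1))

-- ===== PORT B =====
-- perm[pos] = p[j] for pos, p[j] over zip(positions, p)
def altAssign (perm positions p : List Int) : List Int :=
  (positions.zip p).foldl (fun pr q => PySem.List.pySetD pr q.1 q.2) perm

-- helper(b, perm): recursion over the remaining blocks
def altHelper : List (List Int) → List Int → List (List Int)
  | [], perm => [perm]
  | positions :: rest, perm =>
    (pyPermutations positions).flatMap
      (fun p => altHelper rest (altAssign perm positions p))

def column_permutations_by_size_py_alt (group : List Int) : List (List Int) :=
  let block_list := ((PySem.List.enumerate group 0).foldl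
      (fun d p => d.modify p.2 [] (· ++ [p.1])) PySem.Dict.empty).values
  altHelper block_list (PySem.List.pyRange 0 (group.length : Int) 1)

-- ===== PRECONDITION & SPEC =====
def Spec_column_permutations_by_size_py (group : List Int) (out : List (List Int)) : Prop := out = column_permutations_by_size_py_alt group
instance (group : List Int) (out : List (List Int)) : Decidable (Spec_column_permutations_by_size_py group out) := by unfold Spec_column_permutations_by_size_py; infer_instance

-- ===== CLAIM (what is proved, stated in full; the proofs are below) =====
def Claim_equal_column_permutations_by_size_py : Prop := ∀ (group : List Int), Dom_column_permutations_by_size_py group → Spec_column_permutations_by_size_py group (column_permutations_by_size_py group)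

-- ===== LEMMAS AND PROOFS =====

-- every emitted permutation is a rearrangement of the input
theorem mem_pyPermAux_perm (n : Nat) :
    ∀ (xs : List Int), xs.length = n → ∀ p ∈ pyPermAux n xs, p.Perm xs := by
  induction n with
  | zero =>
    intro xs hlen p hp
    simp [pyPermAux] at hp
    subst hp
    exact (List.length_eq_zero_iff.mp hlen) ▸ List.Perm.refl _
  | succ n ih =>
    intro xs hlen p hp
    simp only [pyPermAux, List.mem_flatMap, List.mem_range, List.mem_map] at hp
    obtain ⟨i, hi, r, hr, rfl⟩ := hp
    have hlen' : (xs.eraseIdx i).length = n := by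
      rw [List.length_eraseIdx_of_lt hi, hlen]; omega
    have hperm := ih (xs.eraseIdx i) hlen' r hr
    have : xs.getD i 0 = xs[i] := List.getD_eq_getElem xs 0 hi
    rw [this]
    exact (hperm.cons _).trans (List.getElem_cons_eraseIdx_perm hi)

theorem mem_pyPermutations_perm (xs p : List Int) (hp : p ∈ pyPermutations xs) :
    p.Perm xs := mem_pyPermAux_perm xs.length xs rfl p hp

-- on a strictly-increasing block, sorted(block_perm) is the block itself
theorem sorted_mem_pyPermutations (b p : List Int)
    (hb : b.Pairwise (· < ·)) (hp : p ∈ pyPermutations b) :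
    PySem.List.sorted p (fun x => x) false = b :=
  PySem.List.sorted_eq_of_perm_of_pairwise_lt p b (fun x => x)
    ((mem_pyPermutations_perm b p hp).symm) hb

-- product-then-rebuild (A) equals block recursion (B) on strictly-increasing blocks
theorem product_eq_helper :
    ∀ (blocks : List (List Int)) (perm : List Int),
      (∀ b ∈ blocks, b.Pairwise (· < ·)) →
      (pyProduct (blocks.map pyPermutations)).map
        (fun choice => choice.foldl
          (fun perm bp =>
            ((PySem.List.sorted bp (fun x => x) false).zip bp).foldl
              (fun pr q => PySem.List.pySetD pr q.1 q.2) perm) perm)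
      = altHelper blocks perm := by
  intro blocks
  induction blocks with
  | nil => intro perm _; simp [pyProduct, altHelper]
  | cons b bs ih =>
    intro perm hinc
    simp only [List.map_cons, pyProduct, altHelper, List.map_flatMap]
    refine List.flatMap_congr (fun p hp => ?_)
    rw [List.map_map]
    have hsorted := sorted_mem_pyPermutations b p (hinc b (List.mem_cons_self)) hp
    have hstep : (fun choice : List (List Int) =>
        (p :: choice).foldl
          (fun perm bp =>
            ((PySem.List.sorted bp (fun x => x) false).zip bp).foldl
              (fun pr q => PySem.List.pySetD pr q.1 q.2) perm) perm)
        = (fun choice : List (List Int) => choice.foldl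
          (fun perm bp =>
            ((PySem.List.sorted bp (fun x => x) false).zip bp).foldl
              (fun pr q => PySem.List.pySetD pr q.1 q.2) perm)
          (altAssign perm b p)) := by
      funext choice
      simp only [List.foldl_cons]
      rw [hsorted]
      rfl
    rw [show ((fun choice : List (List Int) => choice.foldl
          (fun perm bp =>
            ((PySem.List.sorted bp (fun x => x) false).zip bp).foldl
              (fun pr q => PySem.List.pySetD pr q.1 q.2) perm) perm) ∘ (fun rest => p :: rest))
        = (fun choice : List (List Int) => choice.foldl
          (fun perm bp =>
            ((PySem.List.sorted bp (fun x => x) false).zip bp).foldl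
              (fun pr q => PySem.List.pySetD pr q.1 q.2) perm)
          (altAssign perm b p)) from hstep]
    exact ih (altAssign perm b p) (fun c hc => hinc c (List.mem_cons_of_mem _ hc))

-- every value of the grouping dict is a strictly-increasing list of indices
theorem values_pairwise (group : List Int) :
    ∀ v ∈ ((PySem.List.enumerate group 0).foldl
        (fun d p => d.modify p.2 [] (· ++ [p.1])) PySem.Dict.empty).values,
      v.Pairwise (· < ·) := by
  intro v hv
  set l := PySem.List.enumerate group 0 with hl
  set d := l.foldl (fun d p => d.modify p.2 [] (· ++ [p.1]))
      (PySem.Dict.empty : PySem.Dict Int (List Int)) with hd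
  have hnodup : d.keys.Nodup := by
    rw [hd]
    exact PySem.Dict.nodup_keys_foldl_modify_key l (fun p => p.2) []
      (fun _ p ls => ls ++ [p.1]) PySem.Dict.empty PySem.Dict.nodup_keys_empty
  rw [PySem.Dict.values_eq_map_keys d hnodup []] at hv
  simp only [List.mem_map] at hv
  obtain ⟨k, _, rfl⟩ := hv
  have hfold : d = (l.map Prod.swap).foldl
      (fun d p => d.modify p.1 [] (· ++ [p.2])) PySem.Dict.empty := by
    rw [hd, List.foldl_map]; rfl
  rw [hfold, PySem.Dict.getD_foldl_modify_append]
  simp only [PySem.Dict.getD_empty, List.nil_append, List.filter_map, List.map_map]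
  have hpl : (l.filter (fun p => (Prod.swap p).1 == k)).Pairwise (fun p q => p.1 < q.1) :=
    (PySem.List.pairwise_lt_enumerate group 0).filter _
  exact hpl.map _ (fun a b h => h)

-- ===== VERDICT (by name: the statement is the Claim_ definition above) =====
theorem column_permutations_by_size_py_spec : Claim_equal_column_permutations_by_size_py := by
  intro group _
  unfold Spec_column_permutations_by_size_py
  unfold column_permutations_by_size_py column_permutations_by_size_py_alt
  exact product_eq_helper _ _ (values_pairwise group)
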